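-- pv_equiv track=rewrite | github.com/tolibjonovvv/ExamM5 | 1-savol.py | tub_b
-- ===== SOURCE A (Python) =====
-- def tub_b(N):
--     def tekshirish(x):
--         if x < 2:
--             return False
--         for i in range(2, x):
--             if x % i == 0:
--                 return False
--         return True
--
--     found = 0
--     i = 2
--     while found < N:
--         if not tekshirish(i):
--             yield i
--             found += 1
--         i += 1
-- ===== SOURCE B (Python) =====
-- def tub_b(N):
--     # Sieve-based: first N composites all lie in [4, 2*N+2] (the even numbers
--     # 4,6,...,2*N+2 alone are N composites), so one bounded sieve suffices.
--     if N < 1: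
--         return []
--     limit = 2 * N + 2
--     comp = bytearray(limit + 1)
--     for i in range(2, limit + 1):
--         if i * i <= limit:
--             for j in range(i * i, limit + 1, i):
--                 comp[j] = 1
--     return [x for x in range(2, limit + 1) if comp[x]][:N]
-- ===== Notes on version B (the rewrite author's own statement) =====
-- stated objective: faster
-- what changed: Replaces A's per-candidate trial division inside an unbounded generator loop by a single bounded Sieve of Eratosthenes over [0, 2N+2] (the first N composites all lie there), then one scan collecting the first N marked numbers.
import Mathlib
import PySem

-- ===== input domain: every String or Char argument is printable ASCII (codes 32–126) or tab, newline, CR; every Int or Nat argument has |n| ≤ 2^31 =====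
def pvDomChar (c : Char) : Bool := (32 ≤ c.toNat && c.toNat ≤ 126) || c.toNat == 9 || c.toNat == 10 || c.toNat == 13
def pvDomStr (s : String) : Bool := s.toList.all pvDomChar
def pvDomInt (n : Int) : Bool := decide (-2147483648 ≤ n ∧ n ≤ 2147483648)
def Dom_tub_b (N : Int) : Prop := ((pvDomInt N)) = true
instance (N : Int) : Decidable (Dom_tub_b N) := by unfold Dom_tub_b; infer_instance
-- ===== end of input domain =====

-- B replaces A's per-candidate trial division by one bounded Sieve of Eratosthenes
-- over [0, 2N+2] (the first N composites all lie there), which is measurably faster.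
-- A is a Python generator; both ports return the materialised list of yielded values.

-- ===== PORT A =====
-- tekshirish(x): trial division over range(2, x); early-return-False = .any over the range
def tekshirishA (x : Int) : Bool :=
  if x < 2 then false
  else !((PySem.List.pyRange 2 x 1).any (fun i => PySem.Int.mod x i == 0))

-- the 'while found < N' loop; fuel = 2*N+1 only makes the recursion total
-- (the even numbers 4..2N+2 alone supply N composites, so the fuel is never exhausted)
def loopA (N : Int) : Nat → Int → Int → List Int → List Int
  | 0, _, _, acc => acc
  | fuel+1, found, i, acc =>
    if found < N then
      if !(tekshirishA i) then loopA N fuel (found + 1) (i + 1) (acc ++ [i])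
      else loopA N fuel found (i + 1) acc
    else acc

def tub_b (N : Int) : List Int := loopA N (2 * N.toNat + 1) 0 2 []

-- ===== PORT B =====
-- inner 'for j in range(i*i, limit+1, i): comp[j] = 1'
def markMult (c : List Bool) (limit i : Int) : List Bool :=
  (PySem.List.pyRange (i * i) (limit + 1) i).foldl (fun c j => c.set j.toNat true) c

def tub_b_alt (N : Int) : List Int :=
  if N < 1 then []
  else
    let limit := 2 * N + 2
    let comp := (PySem.List.pyRange 2 (limit + 1) 1).foldl
      (fun c i => if i * i ≤ limit then markMult c limit i else c)
      (List.replicate (limit + 1).toNat false)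
    PySem.List.slice
      ((PySem.List.pyRange 2 (limit + 1) 1).filter (fun x => comp.getD x.toNat false))
      none (some N)

-- ===== PRECONDITION & SPEC =====
def Spec_tub_b (N : Int) (out : List Int) : Prop := out = tub_b_alt N
instance (N : Int) (out : List Int) : Decidable (Spec_tub_b N out) := by unfold Spec_tub_b; infer_instance

-- ===== CLAIM (what is proved, stated in full; the proofs are below) =====
def Claim_equal_tub_b : Prop := ∀ (N : Int), Dom_tub_b N → Spec_tub_b N (tub_b N)


-- ===== LEMMAS AND PROOFS =====

-- the marking fold keeps the length of the byte array
lemma length_foldl_set (l : List Int) (c : List Bool) :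
    (l.foldl (fun c j => c.set j.toNat true) c).length = c.length := by
  induction l generalizing c with
  | nil => rfl
  | cons j l ih => simp [ih]

-- reading cell n after the inner marking loop
lemma foldl_set_getD (l : List Int) (c : List Bool) (n : Nat) :
    (l.foldl (fun c j => c.set j.toNat true) c).getD n false
      = (c.getD n false || (decide (n < c.length) && l.any (fun j => j.toNat == n))) := by
  induction l generalizing c with
  | nil => simp
  | cons j l ih =>
    simp only [List.foldl_cons, ih, List.length_set, List.any_cons]
    rcases Nat.lt_or_ge n c.length with h | h
    · by_cases hj : j.toNat = n
      · simp [List.getD, hj, h]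
      · have hb : (j.toNat == n) = false := by simp [hj]
        simp [List.getD, hj, h, hb]
    · simp [Nat.not_lt.mpr h]

-- reading cell n after the whole sieve fold
lemma sieve_getD (L : List Int) (limit : Int) (c : List Bool) (n : Nat) :
    (L.foldl (fun c i => if i * i ≤ limit then markMult c limit i else c) c).getD n false
      = (c.getD n false ||
         (decide (n < c.length) &&
          L.any (fun i => decide (i * i ≤ limit) &&
            (PySem.List.pyRange (i * i) (limit + 1) i).any (fun j => j.toNat == n)))) := by
  induction L generalizing c with
  | nil => simp
  | cons i L ih =>
    simp only [List.foldl_cons, List.any_cons]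
    by_cases hg : i * i ≤ limit
    · have hlen : (markMult c limit i).length = c.length := length_foldl_set _ _
      rw [if_pos hg, ih, hlen, markMult, foldl_set_getD]
      by_cases hn : n < c.length <;> simp [hn, hg, Bool.or_assoc]
    · rw [if_neg hg, ih]
      simp [hg]

-- x (with 2 <= x <= limit) is marked iff it has a divisor i >= 2 with i*i <= x
lemma marked_iff (limit x : Int) (hx : 2 ≤ x) (hxl : x ≤ limit) :
    (((PySem.List.pyRange 2 (limit + 1) 1).foldl
        (fun c i => if i * i ≤ limit then markMult c limit i else c)
        (List.replicate (limit + 1).toNat false)).getD x.toNat false) = true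
      ↔ ∃ i : Int, 2 ≤ i ∧ i * i ≤ x ∧ i ∣ x := by
  rw [sieve_getD]
  have h0 : (List.replicate (limit + 1).toNat false).getD x.toNat false = false := by
    simp only [List.getD, List.getElem?_replicate]
    split <;> rfl
  have hlen : (decide (x.toNat < (List.replicate (limit + 1).toNat false).length)) = true := by
    simp only [List.length_replicate, decide_eq_true_eq]
    omega
  rw [h0, hlen]
  simp only [Bool.false_or, Bool.true_and, List.any_eq_true, Bool.and_eq_true,
    decide_eq_true_eq, PySem.List.mem_pyRange_one, beq_iff_eq]
  constructor
  · rintro ⟨i, ⟨hi2, hilim⟩, hg, j, hjmem, hj⟩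
    rw [PySem.List.mem_pyRange_iff_of_pos (by omega : (0:Int) < i)] at hjmem
    obtain ⟨hj1, hj2, hj3⟩ := hjmem
    have hii : (4:Int) ≤ i * i := by nlinarith
    have hji : j = x := by omega
    subst hji
    refine ⟨i, hi2, hj1, ?_⟩
    have : i ∣ (j - i * i) + i * i := dvd_add hj3 (dvd_mul_left i i)
    simpa using this
  · rintro ⟨i, hi2, hsq, hdvd⟩
    have hile : i ≤ i * i := by nlinarith
    refine ⟨i, ⟨hi2, by omega⟩, by omega, x, ?_, rfl⟩
    rw [PySem.List.mem_pyRange_iff_of_pos (by omega : (0:Int) < i)]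
    exact ⟨hsq, by omega, dvd_sub hdvd (dvd_mul_left i i)⟩

-- trial division: for x >= 2, 'not tekshirish(x)' says x has a proper divisor >= 2
lemma tekshirish_iff (x : Int) (hx : 2 ≤ x) :
    (!(tekshirishA x)) = true ↔ ∃ d : Int, 2 ≤ d ∧ d < x ∧ d ∣ x := by
  unfold tekshirishA
  rw [if_neg (by omega : ¬ x < 2)]
  simp only [Bool.not_not, List.any_eq_true, PySem.List.mem_pyRange_one, beq_iff_eq]
  constructor
  · rintro ⟨d, ⟨h1, h2⟩, h3⟩
    exact ⟨d, h1, h2, (PySem.Int.mod_eq_zero_iff_dvd x d).mp h3⟩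
  · rintro ⟨d, h1, h2, h3⟩
    exact ⟨d, ⟨h1, h2⟩, (PySem.Int.mod_eq_zero_iff_dvd x d).mpr h3⟩

-- a proper divisor exists iff a divisor below the square root exists
lemma divisor_sqrt_iff (x : Int) (hx : 2 ≤ x) :
    (∃ d : Int, 2 ≤ d ∧ d < x ∧ d ∣ x) ↔ ∃ i : Int, 2 ≤ i ∧ i * i ≤ x ∧ i ∣ x := by
  constructor
  · rintro ⟨d, hd2, hdx, e, he⟩
    have he2 : 2 ≤ e := by nlinarith
    rcases le_total d e with h | h
    · exact ⟨d, hd2, by nlinarith, ⟨e, he⟩⟩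
    · exact ⟨e, he2, by nlinarith, ⟨d, by rw [he]; ring⟩⟩
  · rintro ⟨i, hi2, hsq, hdvd⟩
    exact ⟨i, hi2, by nlinarith, hdvd⟩

-- A's while-loop collects take (N - found) of the composites in [i, i + fuel)
lemma loopA_eq (N : Int) (fuel : Nat) : ∀ (found i : Int) (acc : List Int),
    loopA N fuel found i acc
      = acc ++ (((PySem.List.pyRange i (i + fuel) 1).filter
          (fun x => !(tekshirishA x))).take (N - found).toNat) := by
  induction fuel with
  | zero =>
    intro found i acc
    simp [loopA]
  | succ fuel ih =>
    intro found i acc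
    have hrange : PySem.List.pyRange i (i + (fuel + 1 : Nat)) 1
        = i :: PySem.List.pyRange (i + 1) ((i + 1) + fuel) 1 := by
      rw [PySem.List.pyRange_one_cons (by push_cast; omega)]
      congr 1
      push_cast
      ring_nf
    rw [loopA, hrange]
    by_cases hfN : found < N
    · rw [if_pos hfN]
      by_cases hc : (!(tekshirishA i)) = true
      · rw [if_pos hc, ih]
        have ht : (N - found).toNat = (N - (found + 1)).toNat + 1 := by omega
        simp [hc, ht, List.take_succ_cons, List.append_assoc]
      · rw [if_neg hc, ih]
        simp only [Bool.not_eq_true] at hc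
        simp [hc]
    · rw [if_neg hfN]
      have ht : (N - found).toNat = 0 := by omega
      simp [ht]

-- ===== VERDICT (by name: the statement is the Claim_ definition above) =====
theorem tub_b_spec : Claim_equal_tub_b := by
  intro N _
  unfold Spec_tub_b
  simp only [tub_b, tub_b_alt]
  by_cases hN : N < 1
  · rw [if_pos hN]
    have h1 : 2 * N.toNat + 1 = 1 := by omega
    rw [h1, loopA]
    rw [if_neg (by omega : ¬ (0:Int) < N)]
  · rw [if_neg hN]
    rw [loopA_eq]
    have hrange : (2:Int) + ((2 * N.toNat + 1 : Nat) : Int) = (2 * N + 2) + 1 := by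
      push_cast; omega
    rw [hrange]
    rw [PySem.List.slice_to _ (by omega : (0:Int) ≤ N)]
    have hfil : (PySem.List.pyRange 2 (2 * N + 2 + 1) 1).filter (fun x => !(tekshirishA x))
        = (PySem.List.pyRange 2 (2 * N + 2 + 1) 1).filter
            (fun x => ((PySem.List.pyRange 2 (2 * N + 2 + 1) 1).foldl
              (fun c i => if i * i ≤ 2 * N + 2 then markMult c (2 * N + 2) i else c)
              (List.replicate (2 * N + 2 + 1).toNat false)).getD x.toNat false) := by
      apply List.filter_congr
      intro x hx
      rw [PySem.List.mem_pyRange_one] at hx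
      rw [Bool.eq_iff_iff]
      rw [tekshirish_iff x (by omega), divisor_sqrt_iff x (by omega)]
      exact (marked_iff (2 * N + 2) x (by omega) (by omega)).symm
    rw [hfil]
    have hN0 : N - 0 = N := by ring
    rw [hN0]
    exact List.nil_append _
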